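-- pv_equiv track=rewrite | github.com/fanck0605/gfw_whitelist | chnroute.py | convert_ip6_address
-- ===== SOURCE A (Python) =====
-- def convert_ip6_address(str_ip):
--     # don't support ipv4-mapped ipv6 address
--     words = str_ip.split(':')
--     pos = words.index('')
--     if pos == 0:
--         pos = words.index('', pos + 1)
--     result = [0, 0, 0, 0]
--     length = len(words)
--     index = 0  # index of ipv6
--     wordi = 0  # index of words
--     while wordi < length:
--         if pos == wordi:
--             index += 9 - length
--         else:
--             word = words[wordi]
--             if word:
--                 if index & 0x1:
--                     result[index >> 1] += int(word, 16)
--                 else: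
--                     result[index >> 1] = int(word, 16) << 16
--             index += 1
--         wordi += 1
--     return result
-- ===== SOURCE B (Python) =====
-- def convert_ip6_address(str_ip):
--     # don't support ipv4-mapped ipv6 address
--     words = str_ip.split(':')
--     pos = words.index('')
--     if pos == 0:
--         pos = words.index('', 1)
--     hx = lambda w: int(w, 16) if w else 0
--     hextets = [hx(w) for w in words[:pos]]
--     hextets += [0] * (9 - len(words))
--     hextets += [hx(w) for w in words[pos + 1:]]
--     return [(hextets[2 * i] << 16) + hextets[2 * i + 1] for i in range(4)]
-- ===== Notes on version B (the rewrite author's own statement) =====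
-- stated objective: simpler
-- what changed: Replaces A's single interleaved loop (index jumping at the empty marker word, bit-tested in-place writes into a 4-slot result) by two declarative passes: build the full 8-hextet list as head words ++ (9-len(words)) zeros ++ tail words, then pair consecutive hextets.
-- intended difference: On strings with 10 or more colon-separated groups (never valid IPv6) where A still completes, A's negative-index wraparound writes the tail groups over the wrong result slots, while B lays the groups out left to right and pairs the first eight hextets, the consistent reading; on 9 or fewer groups the two agree exactly. — e.g. on convert_ip6_address("1:2:3:4:5:6:7:8::9"): A returns [65538, 196612, 327686, 458769], B returns [65538, 196612, 327686, 458760]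
import Mathlib
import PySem

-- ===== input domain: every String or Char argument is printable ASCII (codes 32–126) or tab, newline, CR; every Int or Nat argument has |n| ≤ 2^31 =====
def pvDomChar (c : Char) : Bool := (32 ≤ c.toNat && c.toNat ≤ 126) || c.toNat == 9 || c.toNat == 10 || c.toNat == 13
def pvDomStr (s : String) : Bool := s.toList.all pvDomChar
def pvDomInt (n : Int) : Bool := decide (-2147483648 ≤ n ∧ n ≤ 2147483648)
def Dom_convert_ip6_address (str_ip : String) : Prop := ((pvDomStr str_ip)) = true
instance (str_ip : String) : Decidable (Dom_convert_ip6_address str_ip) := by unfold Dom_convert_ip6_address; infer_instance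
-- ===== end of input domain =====

-- B replaces A's interleaved index-jumping loop (bit-tested writes into a 4-slot result) by two
-- declarative passes: build the full 8-hextet list (head words, 9-len(words) zeros at the double-colon gap, tail
-- words), then pair consecutive hextets; on invalid addresses with ≥ 10 groups (D_ below) A's
-- negative-index wraparound and B's left-to-right layout differ, B's being the consistent reading.


-- ===== PORT A =====
-- the while loop of A, over the enumerated words; state = (result, index)
def convert_ip6_loop (pos length : Int) : List (Int × String) → List Int → Int → List Int
  | [], result, _ => result
  | (wordi, word) :: rest, result, index =>
    if pos = wordi then
      convert_ip6_loop pos length rest result (index + (9 - length))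
    else
      if word ≠ "" then
        let result' :=
          if PySem.Int.band index 1 = 1 then
            PySem.List.pySetD result (index >>> 1)
              (PySem.List.pyGetD result (index >>> 1) 0 + (PySem.Int.ofStrBase? word 16).getD 0)
          else
            PySem.List.pySetD result (index >>> 1) ((PySem.Int.ofStrBase? word 16).getD 0 <<< 16)
        convert_ip6_loop pos length rest result' (index + 1)
      else
        convert_ip6_loop pos length rest result (index + 1)

def convert_ip6_address (str_ip : String) : List Int :=
  let words := (PySem.Str.split? str_ip ":").getD []          -- str_ip.split(':'); sep ≠ "" so never none
  let p0 : Nat := (PySem.List.index? words "").getD 0         -- words.index('') (Pre_ excludes ValueError)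
  -- words.index('', pos+1) with pos = 0: search words[1:] and shift by 1 (exact for start = 1)
  let pos : Int := if p0 = 0 then ((PySem.List.index? (words.drop 1) "").getD 0 : Nat) + 1 else (p0 : Nat)
  convert_ip6_loop pos (words.length : Int) (PySem.List.enumerate words) [0, 0, 0, 0] 0

-- ===== PORT B =====
-- int(w, 16) if w else 0
def pyHex (w : String) : Int := if w ≠ "" then (PySem.Int.ofStrBase? w 16).getD 0 else 0

def convert_ip6_address_alt (str_ip : String) : List Int :=
  let words := (PySem.Str.split? str_ip ":").getD []
  let p0 : Nat := (PySem.List.index? words "").getD 0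
  let pos : Int := if p0 = 0 then ((PySem.List.index? (words.drop 1) "").getD 0 : Nat) + 1 else (p0 : Nat)
  let hextets : List Int :=
    (PySem.List.slice words none (some pos)).map pyHex         -- words[:pos]
      ++ List.replicate ((9 - (words.length : Int)).toNat) 0   -- [0] * (9 - len(words))
      ++ (PySem.List.slice words (some (pos + 1)) none).map pyHex  -- words[pos+1:]
  (PySem.List.pyRange 0 4 1).map (fun i =>
    PySem.List.pyGetD hextets (2 * i) 0 <<< 16 + PySem.List.pyGetD hextets (2 * i + 1) 0)

-- ===== PRECONDITION & SPEC =====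
-- position of the empty-word marker (the double colon) exactly as both programs search for it (none = ValueError)
def pvMarkerPos (words : List String) : Option Int :=
  match PySem.List.index? words "" with
  | none => none
  | some 0 => (PySem.List.index? (words.drop 1) "").map (fun k => (k : Int) + 1)
  | some p => some (p : Int)

-- Pre_ = exactly the inputs where Python A returns: an empty-word marker exists, every non-empty group
-- parses as int(_, 16), and every result write lands in range -4..3 (Python wraparound included).
def Pre_convert_ip6_address (str_ip : String) : Prop :=
  let words := (PySem.Str.split? str_ip ":").getD []
  let pos : Int := (pvMarkerPos words).getD 0
  (pvMarkerPos words).isSome = true ∧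
  (∀ w ∈ words, w ≠ "" → (PySem.Int.ofStrBase? w 16).isSome = true) ∧
  (words.length ≤ 9 ∨
    (pos ≤ 8 ∧ ∀ p ∈ PySem.List.enumerate words, pos < p.1 → p.2 ≠ "" → (words.length : Int) - 16 ≤ p.1))
instance (str_ip : String) : Decidable (Pre_convert_ip6_address str_ip) := by
  unfold Pre_convert_ip6_address; infer_instance

def pvWitness_convert_ip6_address : String := "1::2"

-- On addresses with ≥ 10 colon-separated groups (never valid IPv6) where A still completes, A's
-- negative-index wraparound writes the tail groups over the wrong result slots; B lays the groups
-- out left to right and pairs the first eight hextets, the consistent reading; they agree elsewhere.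
def D_convert_ip6_address (str_ip : String) : Prop :=
  9 ≤ List.count ':' str_ip.toList
instance (str_ip : String) : Decidable (D_convert_ip6_address str_ip) := by
  unfold D_convert_ip6_address; infer_instance

def Spec_convert_ip6_address (str_ip : String) (out : List Int) : Prop :=
  ¬ D_convert_ip6_address str_ip → out = convert_ip6_address_alt str_ip
instance (str_ip : String) (out : List Int) : Decidable (Spec_convert_ip6_address str_ip out) := by
  unfold Spec_convert_ip6_address; infer_instance

def pvDiffWitness_convert_ip6_address : String := "1:2:3:4:5:6:7:8::9"
def pvDiffWitnessOut_convert_ip6_address : (List Int) × (List Int) :=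
  ([65538, 196612, 327686, 458769], [65538, 196612, 327686, 458760])

-- ===== CLAIM =====
def Claim_unchanged_convert_ip6_address : Prop := ∀ (str_ip : String), Dom_convert_ip6_address str_ip → Pre_convert_ip6_address str_ip → Spec_convert_ip6_address str_ip (convert_ip6_address str_ip)
def Claim_changed_convert_ip6_address : Prop := Dom_convert_ip6_address (pvDiffWitness_convert_ip6_address) ∧ Pre_convert_ip6_address (pvDiffWitness_convert_ip6_address) ∧ D_convert_ip6_address (pvDiffWitness_convert_ip6_address) ∧ convert_ip6_address (pvDiffWitness_convert_ip6_address) = pvDiffWitnessOut_convert_ip6_address.1 ∧ convert_ip6_address_alt (pvDiffWitness_convert_ip6_address) = pvDiffWitnessOut_convert_ip6_address.2 ∧ pvDiffWitnessOut_convert_ip6_address.1 ≠ pvDiffWitnessOut_convert_ip6_address.2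

-- ===== LEMMAS AND PROOFS =====
-- pack consecutive pairs of hextets
def pairsOf : List Int → List Int
  | a :: b :: t => (a <<< 16 + b) :: pairsOf t
  | _ => []

-- the hextet stream that A's loop writes, read off the enumerated word list
def hxs (pos : Int) (z : Nat) : List (Int × String) → List Int
  | [] => []
  | (wi, w) :: rest =>
    if pos = wi then List.replicate z 0 ++ hxs pos z rest else pyHex w :: hxs pos z rest

lemma pairsOf_append_even (p t : List Int) (h : p.length % 2 = 0) :
    pairsOf (p ++ t) = pairsOf p ++ pairsOf t := by
  induction p using pairsOf.induct with
  | case1 a b p ih =>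
    have : p.length % 2 = 0 := by simp at h; omega
    simpa [pairsOf] using ih this
  | case2 p hp =>
    rcases p with _ | ⟨a, _ | ⟨b, t⟩⟩
    · simp [pairsOf]
    · simp at h
    · exact absurd rfl (hp a b t)

lemma length_pairsOf (h : List Int) : (pairsOf h).length = h.length / 2 := by
  induction h using pairsOf.induct with
  | case1 a b t ih => simp [pairsOf, ih]; omega
  | case2 p hp =>
    rcases p with _ | ⟨a, _ | ⟨b, t⟩⟩
    · simp [pairsOf]
    · simp [pairsOf]
    · exact absurd rfl (hp a b t)

lemma set_at_len (l t : List Int) (c x : Int) : (l ++ c :: t).set l.length x = l ++ x :: t := by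
  simp

lemma getD_at_len (l t : List Int) (c d : Int) : (l ++ c :: t).getD l.length d = c := by
  simp [List.getD]

lemma shiftr_natCast (i : Nat) : ((i : Int) >>> (1 : Int)) = ((i / 2 : Nat) : Int) := by
  have h1 : ((i : Int) >>> (1 : Int)) = ((i >>> 1 : Nat) : Int) := rfl
  rw [h1, Nat.shiftRight_eq_div_pow]

lemma band_one_natCast (i : Nat) : PySem.Int.band (i : Int) 1 = ((i % 2 : Nat) : Int) := by
  have := PySem.Int.band_natCast i 1
  simp at this ⊢
  omega

lemma rep_cons (n : Nat) (h : 1 ≤ n) :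
    List.replicate n (0 : Int) = 0 :: List.replicate (n - 1) 0 := by
  cases n with
  | zero => omega
  | succ m => simp [List.replicate_succ]

-- main invariant of A's loop in the L ≤ 9 region
lemma loop_eq (pos : Int) (L : Nat) (hL : L ≤ 9) :
    ∀ (suffix : List (Int × String)) (hpre : List Int) (i : Nat),
      hpre.length = i → i + (hxs pos (9 - L) suffix).length = 8 →
      convert_ip6_loop pos (L : Int) suffix (pairsOf (hpre ++ List.replicate (8 - i) 0)) (i : Int)
        = pairsOf (hpre ++ hxs pos (9 - L) suffix) := by
  intro suffix
  induction suffix with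
  | nil =>
    intro hpre i hlen hsum
    have h8 : i = 8 := by simpa [hxs] using hsum
    subst h8
    simp [convert_ip6_loop, hxs]
  | cons hd rest ih =>
    obtain ⟨wi, w⟩ := hd
    intro hpre i hlen hsum
    simp only [convert_ip6_loop]
    by_cases hm : pos = wi
    · rw [if_pos hm]
      simp only [hxs, if_pos hm, List.length_append, List.length_replicate] at hsum
      have hz8 : i + (9 - L) ≤ 8 := by omega
      have hcast : (i : Int) + (9 - (L : Int)) = ((i + (9 - L) : Nat) : Int) := by
        push_cast; omega
      rw [hcast]
      have hrep : hpre ++ List.replicate (8 - i) (0 : Int)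
          = (hpre ++ List.replicate (9 - L) 0) ++ List.replicate (8 - (i + (9 - L))) 0 := by
        rw [List.append_assoc, List.replicate_append_replicate]
        congr 2
        omega
      rw [hrep, ih (hpre ++ List.replicate (9 - L) 0) (i + (9 - L)) (by simp [hlen]) (by omega)]
      simp [hxs, if_pos hm, List.append_assoc]
    · rw [if_neg hm]
      simp only [hxs, if_neg hm, List.length_cons] at hsum
      have hi : i < 8 := by omega
      by_cases hw : w = ""
      · simp only [hw, ne_eq, not_true_eq_false, if_false]
        have hcast : (i : Int) + 1 = ((i + 1 : Nat) : Int) := by push_cast; ring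
        rw [hcast]
        have hrep : hpre ++ List.replicate (8 - i) (0 : Int)
            = (hpre ++ [0]) ++ List.replicate (8 - (i + 1)) 0 := by
          rw [rep_cons (8 - i) (by omega)]
          simp [show 8 - i - 1 = 8 - (i + 1) by omega]
        rw [hrep, ih (hpre ++ [0]) (i + 1) (by simp [hlen]) (by omega)]
        simp [hxs, if_neg hm, pyHex]
      · simp only [ne_eq, hw, not_false_eq_true, if_true]
        have hv : pyHex w = (PySem.Int.ofStrBase? w 16).getD 0 := by simp [pyHex, hw]
        have hband : PySem.Int.band (i : Int) 1 = ((i % 2 : Nat) : Int) := band_one_natCast i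
        have hcast : (i : Int) + 1 = ((i + 1 : Nat) : Int) := by push_cast; ring
        rcases Nat.even_or_odd i with he | ho
        · -- even index: high half is set
          have hmod : i % 2 = 0 := Nat.even_iff.mp he
          rw [hband, hmod]
          rw [if_neg (by norm_num)]
          rw [shiftr_natCast, PySem.List.pySetD_natCast]
          have hrep : hpre ++ List.replicate (8 - i) (0 : Int)
              = hpre ++ 0 :: 0 :: List.replicate (8 - i - 2) 0 := by
            rw [rep_cons (8 - i) (by omega), rep_cons (8 - i - 1) (by omega)]
            simp [show 8 - i - 1 - 1 = 8 - i - 2 by omega]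
          rw [hrep, pairsOf_append_even hpre _ (by omega)]
          have hset : (pairsOf hpre ++ pairsOf (0 :: 0 :: List.replicate (8 - i - 2) 0)).set (i / 2)
                ((PySem.Int.ofStrBase? w 16).getD 0 <<< 16)
              = pairsOf hpre ++ ((PySem.Int.ofStrBase? w 16).getD 0 <<< 16)
                  :: pairsOf (List.replicate (8 - i - 2) 0) := by
            have hlp : (pairsOf hpre).length = i / 2 := by rw [length_pairsOf, hlen]
            rw [show pairsOf (0 :: 0 :: List.replicate (8 - i - 2) (0:Int))
                  = ((0:Int) <<< 16 + 0) :: pairsOf (List.replicate (8 - i - 2) 0) from by simp [pairsOf]]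
            rw [← hlp, set_at_len]
          rw [hset, hcast]
          have htarget : pairsOf hpre ++ ((PySem.Int.ofStrBase? w 16).getD 0 <<< 16)
                :: pairsOf (List.replicate (8 - i - 2) 0)
              = pairsOf ((hpre ++ [pyHex w]) ++ List.replicate (8 - (i + 1)) 0) := by
            rw [List.append_assoc]
            rw [show [pyHex w] ++ List.replicate (8 - (i+1)) (0:Int)
                  = pyHex w :: 0 :: List.replicate (8 - i - 2) 0 from by
              rw [rep_cons (8 - (i+1)) (by omega)]
              simp
              omega]
            rw [pairsOf_append_even hpre _ (by omega)]
            simp [pairsOf, hv]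
          rw [htarget, ih (hpre ++ [pyHex w]) (i + 1) (by simp [hlen]) (by omega)]
          simp [hxs, if_neg hm, List.append_assoc]
        · -- odd index: low half is added
          have hmod : i % 2 = 1 := Nat.odd_iff.mp ho
          rw [hband, hmod]
          rw [if_pos (by norm_num)]
          rw [shiftr_natCast, PySem.List.pySetD_natCast, PySem.List.pyGetD_natCast]
          rcases List.eq_nil_or_concat hpre with hnil | ⟨hp, a, hconc⟩
          · subst hnil; simp at hlen; omega
          · subst hconc
            simp only [List.concat_eq_append] at hlen ⊢
            have hplen : hp.length = i - 1 := by simp at hlen; omega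
            have hrep : (hp ++ [a]) ++ List.replicate (8 - i) (0 : Int)
                = hp ++ a :: 0 :: List.replicate (8 - i - 1) 0 := by
              rw [rep_cons (8 - i) (by omega)]
              simp
            rw [hrep, pairsOf_append_even hp _ (by omega)]
            have hlp : (pairsOf hp).length = i / 2 := by rw [length_pairsOf, hplen]; omega
            rw [show pairsOf (a :: 0 :: List.replicate (8 - i - 1) (0:Int))
                  = (a <<< 16 + 0) :: pairsOf (List.replicate (8 - i - 1) 0) from by simp [pairsOf]]
            rw [← hlp, getD_at_len, set_at_len, hcast]
            have htarget : pairsOf hp ++ (a <<< 16 + 0 + (PySem.Int.ofStrBase? w 16).getD 0)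
                  :: pairsOf (List.replicate (8 - i - 1) 0)
                = pairsOf (((hp ++ [a]) ++ [pyHex w]) ++ List.replicate (8 - (i + 1)) 0) := by
              rw [List.append_assoc, List.append_assoc]
              rw [show [a] ++ ([pyHex w] ++ List.replicate (8 - (i+1)) (0:Int))
                    = a :: pyHex w :: List.replicate (8 - i - 1) 0 from by
                simp [show 8 - (i+1) = 8 - i - 1 by omega]]
              rw [pairsOf_append_even hp _ (by omega)]
              simp [pairsOf, hv]
            rw [htarget, ih ((hp ++ [a]) ++ [pyHex w]) (i + 1) (by simp; omega) (by omega)]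
            simp [hxs, if_neg hm, List.append_assoc]

-- hxs over the enumeration is head ++ zeros ++ tail
lemma hxs_no_marker (pos : Int) (z : Nat) :
    ∀ (xs : List String) (s : Int), pos < s →
      hxs pos z (PySem.List.enumerate xs s) = xs.map pyHex := by
  intro xs
  induction xs with
  | nil => intro s _; simp [PySem.List.enumerate_nil, hxs]
  | cons w rest ih =>
    intro s hs
    rw [PySem.List.enumerate_cons]
    simp only [hxs, if_neg (by omega : ¬ pos = s)]
    rw [ih (s + 1) (by omega)]
    simp

lemma hxs_enumerate (pos : Int) (z : Nat) :
    ∀ (xs : List String) (s : Int), s ≤ pos → pos < s + xs.length →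
      hxs pos z (PySem.List.enumerate xs s)
        = (xs.take (pos - s).toNat).map pyHex ++ List.replicate z 0
            ++ (xs.drop ((pos - s).toNat + 1)).map pyHex := by
  intro xs
  induction xs with
  | nil => intro s h1 h2; simp at h2; omega
  | cons w rest ih =>
    intro s h1 h2
    rw [PySem.List.enumerate_cons]
    by_cases hp : pos = s
    · subst hp
      simp only [hxs]
      rw [hxs_no_marker pos z rest (pos + 1) (by omega)]
      simp
    · have hs : s < pos := by omega
      simp only [hxs, if_neg hp]
      rw [ih (s + 1) (by omega) (by simp at h2 ⊢; omega)]
      have hk : (pos - s).toNat = (pos - (s + 1)).toNat + 1 := by omega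
      rw [hk]
      simp

-- len(str_ip.split(':')) = (number of ':' in str_ip) + 1
lemma go_len : ∀ (fuel : Nat) (l cur : List Char) (acc : List (List Char)), l.length < fuel →
    (PySem.Chars.splitOn.go [':'] fuel l cur acc).length = acc.length + 1 + l.count ':' := by
  intro fuel
  induction fuel with
  | zero => intro l cur acc h; omega
  | succ f ih =>
    intro l cur acc h
    cases l with
    | nil => simp [PySem.Chars.splitOn.go]
    | cons c rest =>
      rw [PySem.Chars.splitOn.go]
      by_cases hc : c = ':'
      · subst hc
        rw [if_pos (by simp [List.isPrefixOf])]
        simp only [List.length_cons] at h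
        rw [ih _ _ _ (by simpa using h)]
        simp
        omega
      · rw [if_neg (by simp [List.isPrefixOf]; exact fun h' => hc h'.symm)]
        simp only [List.length_cons] at h
        rw [ih _ _ _ (by omega)]
        simp [hc]

lemma split_len (s : String) :
    (((PySem.Str.split? s ":").getD []).length) = s.toList.count ':' + 1 := by
  rw [PySem.Str.split?]
  rw [show (":" : String).toList = [':'] from rfl]
  rw [PySem.Chars.split?]
  simp only [List.isEmpty_cons, Bool.false_eq_true, if_false, Option.map_some, Option.getD_some,
    List.length_map]
  rw [PySem.Chars.splitOn, go_len (s.toList.length + 1) _ _ _ (by omega)]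
  simp
  omega

lemma pairs_of_eight (H : List Int) (h : H.length = 8) :
    (PySem.List.pyRange 0 4 1).map (fun i =>
      PySem.List.pyGetD H (2 * i) 0 <<< 16 + PySem.List.pyGetD H (2 * i + 1) 0) = pairsOf H := by
  rcases H with _|⟨a,_|⟨b,_|⟨c,_|⟨d,_|⟨e,_|⟨f,_|⟨g,_|⟨k,rest⟩⟩⟩⟩⟩⟩⟩⟩ <;> simp at h
  have hr : rest = [] := by simpa using h
  subst hr
  rw [show PySem.List.pyRange 0 4 1 = [0, 1, 2, 3] from by decide]
  simp [pairsOf, PySem.List.pyGetD, PySem.List.pyGet?, PySem.List.pyIdx?]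

-- the position the two ports compute is pvMarkerPos
lemma pos_eq_marker (words : List String) (h : (pvMarkerPos words).isSome = true) :
    (if ((PySem.List.index? words "").getD 0) = 0 then
        (((PySem.List.index? (words.drop 1) "").getD 0 : Nat) + 1 : Int)
      else (((PySem.List.index? words "").getD 0 : Nat) : Int))
      = (pvMarkerPos words).getD 0 := by
  cases h0 : PySem.List.index? words "" with
  | none => exfalso; unfold pvMarkerPos at h; rw [h0] at h; simp at h
  | some p =>
    cases p with
    | zero =>
      cases h1 : PySem.List.index? (words.drop 1) "" with
      | none => exfalso; unfold pvMarkerPos at h; rw [h0, h1] at h; simp at h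
      | some k => unfold pvMarkerPos; rw [h0, h1]; simp
    | succ q => unfold pvMarkerPos; rw [h0]; simp

lemma markerPos_bounds (words : List String) (pos : Int)
    (h : pvMarkerPos words = some pos) : 0 ≤ pos ∧ pos < words.length := by
  unfold pvMarkerPos at h
  cases h0 : PySem.List.index? words "" with
  | none => rw [h0] at h; simp at h
  | some p =>
    rw [h0] at h
    have hp : p < words.length := by
      rw [PySem.List.index?_eq_some_iff] at h0
      obtain ⟨pre, suf, hw, hlen, -⟩ := h0
      subst hw hlen; simp
    cases p with
    | zero =>
      simp only at h
      cases h1 : PySem.List.index? (words.drop 1) "" with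
      | none => rw [h1] at h; simp at h
      | some k =>
        rw [h1] at h
        simp at h
        have hk : k < (words.drop 1).length := by
          rw [PySem.List.index?_eq_some_iff] at h1
          obtain ⟨pre, suf, hw, hlen, -⟩ := h1
          rw [hw]; simp; omega
        simp at hk
        omega
    | succ q => simp at h; omega

-- ===== VERDICT =====
theorem convert_ip6_address_spec : Claim_unchanged_convert_ip6_address := by
  intro str_ip _hdom hpre
  unfold Spec_convert_ip6_address
  intro hnd
  unfold Pre_convert_ip6_address at hpre
  unfold D_convert_ip6_address at hnd
  simp only at hpre hnd
  set words := (PySem.Str.split? str_ip ":").getD [] with hwords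
  obtain ⟨hms, -, -⟩ := hpre
  set pos : Int := (pvMarkerPos words).getD 0 with hposdef
  obtain ⟨posv, hpv⟩ := Option.isSome_iff_exists.mp hms
  have hposv : pos = posv := by rw [hposdef, hpv]; rfl
  have hbounds := markerPos_bounds words posv hpv
  have hpos0 : 0 ≤ pos := by rw [hposv]; exact hbounds.1
  have hposlt : pos < words.length := by rw [hposv]; exact hbounds.2
  have hL : words.length ≤ 9 := by
    have hsl := split_len str_ip
    rw [← hwords] at hsl
    omega
  -- both ports, rewritten through the common pos
  unfold convert_ip6_address convert_ip6_address_alt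
  simp only [← hwords]
  rw [pos_eq_marker words hms, ← hposdef]
  -- A side: run the loop invariant from the empty prefix
  have henum := hxs_enumerate pos (9 - words.length) words 0 (by omega) (by simpa using hposlt)
  simp only [Int.sub_zero] at henum
  have htn : (0 : Int) + (words.length : Int) = words.length := by ring
  have hlens : (hxs pos (9 - words.length) (PySem.List.enumerate words 0)).length = 8 := by
    rw [henum]
    simp
    omega
  have hA := loop_eq pos words.length hL (PySem.List.enumerate words 0) [] 0 rfl (by omega)
  simp only [List.nil_append, Nat.sub_zero, Nat.cast_zero] at hA
  have hinit : (List.replicate 8 (0 : Int)) = [0, 0, 0, 0, 0, 0, 0, 0] := by decide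
  rw [hinit] at hA
  have hA' : convert_ip6_loop pos (words.length : Int) (PySem.List.enumerate words 0) [0, 0, 0, 0] 0
      = pairsOf (hxs pos (9 - words.length) (PySem.List.enumerate words 0)) := by
    rw [← hA]
    norm_num [pairsOf]
  rw [hA', henum]
  -- B side: the slices are the same head/zeros/tail decomposition
  rw [PySem.List.slice_to _ hpos0, PySem.List.slice_from _ (by omega : (0:Int) ≤ pos + 1)]
  have h1 : (pos + 1).toNat = pos.toNat + 1 := by omega
  have h2 : ((9 : Int) - (words.length : Int)).toNat = 9 - words.length := by omega
  rw [h1, h2, pairs_of_eight]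
  simp
  omega

theorem convert_ip6_address_changed : Claim_changed_convert_ip6_address := by
  unfold Claim_changed_convert_ip6_address; decide
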